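-- pv_equiv track=rewrite | github.com/githubuser2000/todel-git-dir-fuerUbergangsFiles | bruch4reta.py | grKl
-- ===== SOURCE A (Python) =====
-- def grKl(A: set, B: set) -> tuple[set, set]:
--     """
--     Gibt 2 Mengen zurück: eine Menge aus allem, das größer ist als im ersten Parameter aus dem zweiten Parameter
--     und in die zweite Menge kommt alles, das kleiner ist, als in der ersten Menge aus der zweiten Menge
--     """
--     C = set()
--     D = set()
--     if len(B) == 0:
--         return A, A
--     for a in A:
--         if a > max(B):
--             C.add(a)
--         elif a < min(B):
--             D.add(a)
--     return C, D
-- ===== SOURCE B (Python) =====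
-- def grKl(A: set, B: set) -> tuple[set, set]:
--     C, D = set(A), set(A)
--     for b in B:
--         C = {a for a in C if a > b}
--         D = {a for a in D if a < b}
--     return C, D
-- ===== Notes on version B (the rewrite author's own statement) =====
-- stated objective: alternative
-- what changed: B never computes max(B)/min(B): it iterates over B, successively narrowing two candidate sets that both start as A (keeping only elements greater / smaller than the current b), instead of A's loop over A that classifies each element against extrema of B recomputed in every iteration; the candidate sets shrink after the first few elements of B, while A rescans all of B via max()/min() for every element of A.
import Mathlib
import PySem

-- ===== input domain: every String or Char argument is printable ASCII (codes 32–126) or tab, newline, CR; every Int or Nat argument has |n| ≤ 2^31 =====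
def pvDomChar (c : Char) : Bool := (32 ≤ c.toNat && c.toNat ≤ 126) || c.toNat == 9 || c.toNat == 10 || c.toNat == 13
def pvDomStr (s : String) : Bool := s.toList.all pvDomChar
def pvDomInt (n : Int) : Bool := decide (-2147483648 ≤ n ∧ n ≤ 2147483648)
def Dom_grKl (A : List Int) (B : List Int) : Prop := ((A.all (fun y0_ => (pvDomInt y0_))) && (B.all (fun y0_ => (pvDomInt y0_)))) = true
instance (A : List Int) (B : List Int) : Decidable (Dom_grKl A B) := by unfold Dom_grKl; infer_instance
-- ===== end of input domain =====

-- B never computes max(B)/min(B): it iterates over B, successively narrowing two candidate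
-- sets that both start as A, instead of A's loop over A classifying each element against
-- the extrema of B (alternative decomposition, same asymptotic cost).

-- ===== PORT A =====
def grKl (A : List Int) (B : List Int) : List Int × List Int :=
  let C : PySem.Set Int := PySem.Set.empty
  let D : PySem.Set Int := PySem.Set.empty
  if B.length = 0 then (A, A)
  else
    let r := A.foldl (fun (cd : PySem.Set Int × PySem.Set Int) a =>
      if a > (PySem.List.max? B (fun x => x)).getD 0 then (PySem.Set.add cd.1 a, cd.2)
      else if a < (PySem.List.min? B (fun x => x)).getD 0 then (cd.1, PySem.Set.add cd.2 a)
      else cd) (C, D)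
    (r.1, r.2)

-- ===== PORT B =====
def grKl_alt (A : List Int) (B : List Int) : List Int × List Int :=
  B.foldl (fun (cd : PySem.Set Int × PySem.Set Int) b =>
      (cd.1.filter (fun a => decide (a > b)), cd.2.filter (fun a => decide (a < b))))
    (PySem.Set.ofList A, PySem.Set.ofList A)

-- ===== PRECONDITION & SPEC =====
-- A and B are Python sets: their list representations hold distinct elements (only A's matters).
def Pre_grKl (A : List Int) (B : List Int) : Prop := A.Nodup
instance (A : List Int) (B : List Int) : Decidable (Pre_grKl A B) := by unfold Pre_grKl; infer_instance
def pvWitness_grKl : List Int × List Int := ([1, 5, -3], [0, 2])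

def Spec_grKl (A : List Int) (B : List Int) (out : List Int × List Int) : Prop := out = grKl_alt A B
instance (A : List Int) (B : List Int) (out : List Int × List Int) : Decidable (Spec_grKl A B out) := by unfold Spec_grKl; infer_instance

-- ===== CLAIM (what is proved, stated in full; the proofs are below) =====
def Claim_equal_grKl : Prop := ∀ (A : List Int) (B : List Int), Dom_grKl A B → Pre_grKl A B → Spec_grKl A B (grKl A B)

-- ===== LEMMAS AND PROOFS =====

-- B's fold over B is the pair of "greater/smaller than every element of B" filters.
theorem alt_fold_eq :
    ∀ (B C D : List Int),
    B.foldl (fun (cd : PySem.Set Int × PySem.Set Int) b =>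
        (cd.1.filter (fun a => decide (a > b)), cd.2.filter (fun a => decide (a < b)))) (C, D)
      = (C.filter (fun a => B.all (fun b => decide (a > b))),
         D.filter (fun a => B.all (fun b => decide (a < b)))) := by
  intro B
  induction B with
  | nil => intro C D; simp
  | cons b t ih =>
    intro C D
    simp only [List.foldl_cons, ih, List.filter_filter, List.all_cons, Prod.mk.injEq]
    constructor <;> (apply List.filter_congr; intro a _; simp [Bool.and_comm])

-- set(A) = A for a duplicate-free list A.
theorem foldl_add_nodup : ∀ (t s : List Int), (s ++ t).Nodup → t.foldl PySem.Set.add s = s ++ t := by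
  intro t
  induction t with
  | nil => intro s _; simp
  | cons x u ih =>
    intro s h
    have hxs : x ∉ s := fun hm =>
      (List.disjoint_of_nodup_append h) hm (List.mem_cons_self ..)
    simp only [List.foldl_cons]
    have hadd : PySem.Set.add s x = s ++ [x] := by
      simp [PySem.Set.add, PySem.Set.contains, hxs]
    rw [hadd]
    have := ih (s ++ [x]) (by simpa [List.append_assoc] using h)
    simpa [List.append_assoc] using this

theorem ofList_nodup (A : List Int) (h : A.Nodup) : PySem.Set.ofList A = A := by
  have := foldl_add_nodup A [] (by simpa using h)
  simpa [PySem.Set.ofList, PySem.Set.empty] using this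

-- A's fold over A appends the two bound-filters of A to the accumulators.
theorem grKl_fold_eq (mx mn : Int) (hmm : mn ≤ mx) :
    ∀ (A C D : List Int), A.Nodup → (∀ a ∈ A, a ∉ C) → (∀ a ∈ A, a ∉ D) →
    A.foldl (fun (cd : PySem.Set Int × PySem.Set Int) a =>
        if a > mx then (PySem.Set.add cd.1 a, cd.2)
        else if a < mn then (cd.1, PySem.Set.add cd.2 a)
        else cd) (C, D)
      = (C ++ A.filter (fun a => decide (a > mx)), D ++ A.filter (fun a => decide (a < mn))) := by
  intro A
  induction A with
  | nil => intro C D _ _ _; simp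
  | cons a t ih =>
    intro C D hnd hC hD
    have hat : a ∉ t := (List.nodup_cons.mp hnd).1
    have hnt : t.Nodup := (List.nodup_cons.mp hnd).2
    have haC : a ∉ C := hC a (List.mem_cons_self ..)
    have haD : a ∉ D := hD a (List.mem_cons_self ..)
    simp only [List.foldl_cons, List.filter_cons]
    by_cases h1 : a > mx
    · have : PySem.Set.add C a = C ++ [a] := by
        simp [PySem.Set.add, PySem.Set.contains, haC]
      rw [if_pos h1, this, ih (C ++ [a]) D hnt
        (fun x hx => by
          simp only [List.mem_append, List.mem_singleton]
          rintro (hxc | rfl)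
          · exact hC x (List.mem_cons_of_mem _ hx) hxc
          · exact hat hx)
        (fun x hx => hD x (List.mem_cons_of_mem _ hx))]
      simp [h1, show ¬ (a < mn) by omega, List.append_assoc]
    · rw [if_neg h1]
      by_cases h2 : a < mn
      · have : PySem.Set.add D a = D ++ [a] := by
          simp [PySem.Set.add, PySem.Set.contains, haD]
        rw [if_pos h2, this, ih C (D ++ [a]) hnt
          (fun x hx => hC x (List.mem_cons_of_mem _ hx))
          (fun x hx => by
            simp only [List.mem_append, List.mem_singleton]
            rintro (hxd | rfl)
            · exact hD x (List.mem_cons_of_mem _ hx) hxd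
            · exact hat hx)]
        simp [h1, h2, List.append_assoc]
      · rw [if_neg h2, ih C D hnt
          (fun x hx => hC x (List.mem_cons_of_mem _ hx))
          (fun x hx => hD x (List.mem_cons_of_mem _ hx))]
        simp [h1, h2]

-- ===== VERDICT (by name: the statement is the Claim_ definition above) =====
theorem grKl_spec : Claim_equal_grKl := by
  intro A B _ hpre
  unfold Spec_grKl grKl grKl_alt
  rw [alt_fold_eq, ofList_nodup A hpre]
  by_cases hB : B.length = 0
  · have : B = [] := List.length_eq_zero_iff.mp hB
    subst this
    simp
  · have hBne : B ≠ [] := fun e => hB (by simp [e])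
    obtain ⟨M, hM⟩ := Option.ne_none_iff_exists'.mp
      (by simp [PySem.List.max?_eq_none_iff, hBne] : PySem.List.max? B (fun x => x) ≠ none)
    obtain ⟨m, hm⟩ := Option.ne_none_iff_exists'.mp
      (by simp [PySem.List.min?_eq_none_iff, hBne] : PySem.List.min? B (fun x => x) ≠ none)
    have hmm : m ≤ M := PySem.List.max?_isMax hM m (PySem.List.min?_mem hm)
    simp only [hB, ite_false, hM, hm, Option.getD_some, PySem.Set.empty]
    rw [grKl_fold_eq M m hmm A [] [] hpre (by simp) (by simp)]
    simp only [List.nil_append, Prod.mk.injEq]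
    constructor <;> apply List.filter_congr <;> intro a _
    · rw [Bool.eq_iff_iff]; simp only [List.all_eq_true, decide_eq_true_eq]
      constructor
      · intro h b hb
        exact lt_of_le_of_lt (PySem.List.max?_isMax hM b hb) h
      · intro h
        exact h M (PySem.List.max?_mem hM)
    · rw [Bool.eq_iff_iff]; simp only [List.all_eq_true, decide_eq_true_eq]
      constructor
      · intro h b hb
        exact lt_of_lt_of_le h (PySem.List.min?_isMin hm b hb)
      · intro h
        exact h m (PySem.List.min?_mem hm)
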